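-- pv_equiv track=rewrite | github.com/LelsersLasers/NewYorkTimesWordGameHelpers | wordle2.py | clean_word_list
-- ===== SOURCE A (Python) =====
-- def has_double_letters(word):
--     letters = []
--     for letter in word:
--         if letter in letters:
--             return True
--         else:
--             letters.append(letter)
--     return False
--
-- def clean_word_list(words, word_len, double_letters):
--     filtered_words = []
--     for word in words:
--         if len(word) == word_len and not (
--             not double_letters and has_double_letters(word)
--         ):
--             filtered_words.append(word)
--     return filtered_words
-- ===== SOURCE B (Python) =====
-- def no_adjacent_dup(s):
--     return all(a != b for a, b in zip(s, s[1:]))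
--
-- def clean_word_list(words, word_len, double_letters):
--     right_len = [w for w in words if len(w) == word_len]
--     if double_letters:
--         return right_len
--     return [w for w in right_len if no_adjacent_dup(sorted(w))]
-- ===== Notes on version B (the rewrite author's own statement) =====
-- stated objective: alternative
-- what changed: Two staged passes instead of one accumulating loop, and the duplicate detection is sort-then-adjacent-scan (a word has a repeated letter iff its sorted letters contain an equal adjacent pair) instead of an incremental seen-list membership scan with early return.
import Mathlib
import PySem

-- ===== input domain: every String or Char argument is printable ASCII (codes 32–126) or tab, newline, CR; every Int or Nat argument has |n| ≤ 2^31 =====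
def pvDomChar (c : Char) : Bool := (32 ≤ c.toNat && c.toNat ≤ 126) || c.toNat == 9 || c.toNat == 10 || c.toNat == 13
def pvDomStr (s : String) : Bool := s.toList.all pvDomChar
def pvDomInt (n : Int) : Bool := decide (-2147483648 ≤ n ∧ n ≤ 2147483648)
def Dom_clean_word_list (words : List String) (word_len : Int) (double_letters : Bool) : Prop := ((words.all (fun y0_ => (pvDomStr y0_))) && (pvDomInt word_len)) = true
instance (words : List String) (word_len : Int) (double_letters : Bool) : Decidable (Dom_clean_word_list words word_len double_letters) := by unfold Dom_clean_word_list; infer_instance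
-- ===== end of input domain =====

-- B filters in two staged passes and detects repeated letters by sorting the word and scanning adjacent pairs, instead of A's single loop with an incremental seen-list membership scan; alternative algorithm, same behaviour.


-- ===== PORT A =====
-- loop of has_double_letters: 'letters' accumulator, early return True on a repeat
def pvHdlLoop (letters : List Char) : List Char → Bool
  | [] => false
  | letter :: rest =>
    if letters.contains letter then true
    else pvHdlLoop (letters ++ [letter]) rest

def has_double_letters (word : String) : Bool := pvHdlLoop [] word.toList

def clean_word_list (words : List String) (word_len : Int) (double_letters : Bool) : List String :=
  words.foldl
    (fun filtered_words word =>
      if (PySem.Str.len word == word_len) && !(!double_letters && has_double_letters word)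
      then filtered_words ++ [word]
      else filtered_words)
    []

-- ===== PORT B =====
-- all(a != b for a, b in zip(s, s[1:]))
def no_adjacent_dup (s : List Char) : Bool :=
  (s.zip s.tail).all (fun p => p.1 != p.2)

def clean_word_list_alt (words : List String) (word_len : Int) (double_letters : Bool) : List String :=
  let right_len := words.filter (fun w => PySem.Str.len w == word_len)
  if double_letters then right_len
  else right_len.filter (fun w => no_adjacent_dup (PySem.List.sorted w.toList (fun x => x) false))

-- ===== PRECONDITION & SPEC =====
def Spec_clean_word_list (words : List String) (word_len : Int) (double_letters : Bool) (out : List String) : Prop := out = clean_word_list_alt words word_len double_letters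
instance (words : List String) (word_len : Int) (double_letters : Bool) (out : List String) : Decidable (Spec_clean_word_list words word_len double_letters out) := by unfold Spec_clean_word_list; infer_instance

-- ===== CLAIM (what is proved, stated in full; the proofs are below) =====
def Claim_equal_clean_word_list : Prop := ∀ (words : List String) (word_len : Int) (double_letters : Bool), Dom_clean_word_list words word_len double_letters → Spec_clean_word_list words word_len double_letters (clean_word_list words word_len double_letters)

-- ===== LEMMAS AND PROOFS =====

-- A's scan returns False exactly when the word has no repeated letter and none is already in the accumulator
theorem pvHdlLoop_eq_false_iff (l s : List Char) :
    pvHdlLoop s l = false ↔ (l.Nodup ∧ ∀ x ∈ l, x ∉ s) := by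
  induction l generalizing s with
  | nil => simp [pvHdlLoop]
  | cons c rest ih =>
    by_cases hc : c ∈ s
    · simp [pvHdlLoop, hc]
    · rw [show pvHdlLoop s (c :: rest) = pvHdlLoop (s ++ [c]) rest by
        simp [pvHdlLoop, hc]]
      rw [ih]
      constructor
      · rintro ⟨hnd, hmem⟩
        refine ⟨List.nodup_cons.mpr ⟨fun hcr => (hmem c hcr (by simp)), hnd⟩, ?_⟩
        intro x hx
        rcases List.mem_cons.mp hx with hx | hx
        · subst hx; exact hc
        · exact fun hxs => hmem x hx (by simp [hxs])
      · rintro ⟨hnd, hmem⟩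
        rcases List.nodup_cons.mp hnd with ⟨hcr, hrest⟩
        refine ⟨hrest, ?_⟩
        intro x hx hxsc
        rcases List.mem_append.mp hxsc with h | h
        · exact hmem x (by simp [hx]) h
        · simp at h; subst h; exact hcr hx

-- the adjacent scan on a ≤-sorted list decides Nodup
theorem no_adjacent_dup_eq_true_iff (s : List Char) (hs : s.Pairwise (· ≤ ·)) :
    no_adjacent_dup s = true ↔ s.Nodup := by
  induction s with
  | nil => simp [no_adjacent_dup]
  | cons a t ih =>
    rcases List.pairwise_cons.mp hs with ⟨hat, ht⟩
    cases t with
    | nil => simp [no_adjacent_dup]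
    | cons b t' =>
      have hbt : (b :: t').Pairwise (· ≤ ·) := ht
      have step : no_adjacent_dup (a :: b :: t') =
          ((a != b) && no_adjacent_dup (b :: t')) := by
        simp [no_adjacent_dup, List.zip, Bool.and_comm]
      rw [step]
      constructor
      · intro h
        rcases (Bool.and_eq_true _ _).mp h with ⟨hne, hrest⟩
        have hab : a ≠ b := by simpa using hne
        have hlt : a < b := lt_of_le_of_ne (hat b (by simp)) hab
        have hndt : (b :: t').Nodup := (ih hbt).mp hrest
        refine List.nodup_cons.mpr ⟨?_, hndt⟩
        intro hmem
        rcases List.mem_cons.mp hmem with h | h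
        · exact hab h
        · have hbx : b ≤ a := (List.pairwise_cons.mp hbt).1 a h
          exact absurd (lt_of_lt_of_le hlt hbx) (lt_irrefl a)
      · intro hnd
        rcases List.nodup_cons.mp hnd with ⟨hnm, hndt⟩
        have hab : a ≠ b := fun h => hnm (by simp [h])
        refine (Bool.and_eq_true _ _).mpr ⟨by simpa using hab, (ih hbt).mpr hndt⟩

-- bridge: A's duplicate test agrees with B's sort-then-adjacent-scan
theorem hdl_iff_noadj (w : String) :
    (!has_double_letters w) =
      no_adjacent_dup (PySem.List.sorted w.toList (fun x => x) false) := by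
  have hperm : (PySem.List.sorted w.toList (fun x => x) false).Perm w.toList :=
    PySem.List.sorted_perm _ _ _
  have hpw : (PySem.List.sorted w.toList (fun x => x) false).Pairwise (· ≤ ·) := by
    simpa using PySem.List.sorted_pairwise (xs := w.toList) (key := fun x => x)
  have h1 : has_double_letters w = false ↔ w.toList.Nodup := by
    rw [has_double_letters, pvHdlLoop_eq_false_iff]; simp
  have h2 := no_adjacent_dup_eq_true_iff _ hpw
  rw [hperm.nodup_iff] at h2
  cases h : has_double_letters w with
  | false => simp [h2.mpr (h1.mp h)]
  | true =>
    have hnd : ¬ w.toList.Nodup := fun hn => by simp [h1.mpr hn] at h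
    have hf : no_adjacent_dup (PySem.List.sorted w.toList (fun x => x) false) = false := by
      cases hh : no_adjacent_dup (PySem.List.sorted w.toList (fun x => x) false) with
      | false => rfl
      | true => exact absurd (h2.mp hh) hnd
    simp [hf]

theorem clean_word_list_spec : Claim_equal_clean_word_list := by
  intro words word_len double_letters _
  unfold Spec_clean_word_list clean_word_list clean_word_list_alt
  rw [PySem.List.foldl_append_if_eq_filter, List.nil_append]
  cases double_letters with
  | true => simp
  | false =>
    simp only [Bool.not_false, Bool.true_and, if_neg (Bool.false_ne_true), List.filter_filter]
    apply List.filter_congr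
    intro w _
    rw [hdl_iff_noadj w, Bool.and_comm]
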